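-- pv_equiv track=rewrite | github.com/AnaCosta956/ATP2021-A95694 | TPC8/TPC8.py | distrib
-- ===== SOURCE A (Python) =====
-- def distrib(bd, ind):
--     dis={}
--     for e in bd:
--         if e[ind] in dis:
--             dis[e[ind]]=dis[e[ind]]+1
--         else:
--             dis[e[ind]]=1
--     disl=list(dis.items())
--     disl.sort(key= lambda x:x[0])
--     res=dict(disl)
--     return res
-- ===== SOURCE B (Python) =====
-- def distrib(bd, ind):
--     # Sort the extracted key fields once, then count consecutive runs:
--     # the result dict is built directly in ascending key order.
--     keys = sorted(e[ind] for e in bd)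
--     res = {}
--     i = 0
--     n = len(keys)
--     while i < n:
--         j = i + 1
--         while j < n and keys[j] == keys[i]:
--             j += 1
--         res[keys[i]] = j - i
--         i = j
--     return res
-- ===== Notes on version B (the rewrite author's own statement) =====
-- stated objective: alternative
-- what changed: Instead of counting into a dict and sorting the items afterwards, B sorts the extracted key fields once and counts consecutive runs in the sorted sequence, building the result dict directly in ascending key order.
import Mathlib
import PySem

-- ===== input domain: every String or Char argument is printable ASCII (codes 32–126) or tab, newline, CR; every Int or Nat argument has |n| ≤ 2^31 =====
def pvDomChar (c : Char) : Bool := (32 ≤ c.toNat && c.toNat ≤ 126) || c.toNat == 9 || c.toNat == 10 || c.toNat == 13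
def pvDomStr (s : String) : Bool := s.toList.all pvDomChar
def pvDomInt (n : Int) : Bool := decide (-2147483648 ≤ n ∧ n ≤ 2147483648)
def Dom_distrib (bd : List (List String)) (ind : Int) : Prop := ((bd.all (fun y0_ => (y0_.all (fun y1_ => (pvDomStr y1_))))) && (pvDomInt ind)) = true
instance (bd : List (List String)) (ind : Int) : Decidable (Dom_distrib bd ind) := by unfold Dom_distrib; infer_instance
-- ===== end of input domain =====

-- B counts runs over the once-sorted key fields instead of A's dict-count-then-sort; equal return value on Pre_.

-- ===== PORT A =====
-- A's loop body; the `none` branch is unreachable under Pre_distrib (Python raises IndexError there)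
def distribStep (ind : Int) (d : PySem.Dict String Int) (e : List String) : PySem.Dict String Int :=
  match PySem.List.pyGet? e ind with
  | some k => if d.contains k then d.insert k (d.getD k 0 + 1) else d.insert k 1
  | none => d

def distrib (bd : List (List String)) (ind : Int) : List (String × Int) :=
  let dis := bd.foldl (distribStep ind) PySem.Dict.empty
  let disl := PySem.List.sorted dis.items (fun x => x.1) false
  (PySem.Dict.ofList disl).items

-- ===== PORT B =====
-- Source B's while loop over the sorted keys: each step consumes one run of equal keys
-- (takeWhile = the inner `while keys[j] == keys[i]` scan) and records its length.
def runCount : List String → PySem.Dict String Int → PySem.Dict String Int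
  | [], res => res
  | k :: t, res =>
      runCount (t.dropWhile (· == k)) (res.insert k (1 + ((t.takeWhile (· == k)).length : Int)))
termination_by l _ => l.length
decreasing_by simpa using Nat.lt_succ_of_le (t.length_dropWhile_le _)

def distrib_alt (bd : List (List String)) (ind : Int) : List (String × Int) :=
  let keys := PySem.List.sorted (bd.filterMap (fun e => PySem.List.pyGet? e ind)) (fun x => x) false
  (runCount keys PySem.Dict.empty).items

-- ===== PRECONDITION & SPEC =====
-- Pre_ excludes exactly the inputs where some row lacks the index ind: there Python's e[ind] raises IndexError.
def Pre_distrib (bd : List (List String)) (ind : Int) : Prop :=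
  ∀ e ∈ bd, PySem.Raise.InRange e.length ind
instance (bd : List (List String)) (ind : Int) : Decidable (Pre_distrib bd ind) := by unfold Pre_distrib; infer_instance

def pvWitness_distrib : List (List String) × Int := ([["a"], ["b"], ["a"]], 0)

def Spec_distrib (bd : List (List String)) (ind : Int) (out : List (String × Int)) : Prop := out = distrib_alt bd ind
instance (bd : List (List String)) (ind : Int) (out : List (String × Int)) : Decidable (Spec_distrib bd ind out) := by unfold Spec_distrib; infer_instance

-- ===== CLAIM (what is proved, stated in full; the proofs are below) =====
def Claim_equal_distrib : Prop := ∀ (bd : List (List String)) (ind : Int), Dom_distrib bd ind → Pre_distrib bd ind → Spec_distrib bd ind (distrib bd ind)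

-- ===== LEMMAS AND PROOFS =====

-- pure-list form of B's run scan: (key, run length) for each run of the (sorted) key list
def runsList : List String → List (String × Int)
  | [] => []
  | k :: t => (k, 1 + ((t.takeWhile (· == k)).length : Int)) :: runsList (t.dropWhile (· == k))
termination_by l => l.length
decreasing_by simpa using Nat.lt_succ_of_le (t.length_dropWhile_le _)

theorem pv_dropWhile_head_false {p : String → Bool} :
    ∀ (t : List String) {d0 : String} {rest : List String},
      t.dropWhile p = d0 :: rest → p d0 = false := by
  intro t
  induction t with
  | nil => intro d0 rest h; simp at h
  | cons a t' ih =>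
    intro d0 rest h
    rw [List.dropWhile_cons] at h
    by_cases hp : p a
    · exact ih (by rwa [if_pos hp] at h)
    · rw [if_neg hp] at h
      injection h with h1 _
      rw [← h1]
      exact Bool.eq_false_iff.mpr hp

theorem pv_not_mem_dropWhile {k : String} {t : List String}
    (hs : (k :: t).Pairwise (· ≤ ·)) : k ∉ t.dropWhile (· == k) := by
  intro hk
  cases hdw : t.dropWhile (· == k) with
  | nil => rw [hdw] at hk; simp at hk
  | cons d0 rest =>
    rw [hdw] at hk
    have hd0f : (d0 == k) = false := pv_dropWhile_head_false (p := (· == k)) t hdw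
    have hd0ne : d0 ≠ k := by simpa using hd0f
    have hsub : (t.dropWhile (· == k)).Sublist t := List.dropWhile_sublist _
    have hd0t : d0 ∈ t := hsub.subset (by rw [hdw]; exact List.mem_cons_self)
    have hk_le : k ≤ d0 := List.rel_of_pairwise_cons hs hd0t
    have hpw : (d0 :: rest).Pairwise (fun a b : String => a ≤ b) := by
      rw [← hdw]; exact List.Pairwise.sublist hsub (List.Pairwise.of_cons hs)
    rcases List.mem_cons.mp hk with h | h
    · exact hd0ne h.symm
    · exact hd0ne (le_antisymm (List.rel_of_pairwise_cons hpw h) hk_le)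

theorem pv_mem_takeWhile_eq {k x : String} {t : List String}
    (h : x ∈ t.takeWhile (· == k)) : x = k := by
  simpa using List.mem_takeWhile_imp h

theorem pv_count_head {k : String} {t : List String} (hs : (k :: t).Pairwise (· ≤ ·)) :
    (k :: t).count k = 1 + (t.takeWhile (· == k)).length := by
  have htw : (t.takeWhile (· == k)).count k = (t.takeWhile (· == k)).length :=
    List.count_eq_length.mpr (fun b hb => (pv_mem_takeWhile_eq hb).symm)
  have hdw : (t.dropWhile (· == k)).count k = 0 :=
    List.count_eq_zero.mpr (pv_not_mem_dropWhile hs)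
  calc (k :: t).count k = 1 + t.count k := by rw [List.count_cons_self]; omega
    _ = 1 + ((t.takeWhile (· == k)) ++ (t.dropWhile (· == k))).count k := by
          rw [List.takeWhile_append_dropWhile]
    _ = 1 + (t.takeWhile (· == k)).length := by rw [List.count_append, htw, hdw]; omega

theorem pv_mem_dropWhile_ne {k x : String} {t : List String}
    (hs : (k :: t).Pairwise (· ≤ ·)) (hx : x ∈ t.dropWhile (· == k)) : x ≠ k :=
  fun h => pv_not_mem_dropWhile hs (h ▸ hx)

theorem pv_count_dropWhile {k x : String} {t : List String}
    (hs : (k :: t).Pairwise (· ≤ ·)) (hx : x ∈ t.dropWhile (· == k)) :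
    (t.dropWhile (· == k)).count x = (k :: t).count x := by
  have hxk : x ≠ k := pv_mem_dropWhile_ne hs hx
  have htw : (t.takeWhile (· == k)).count x = 0 :=
    List.count_eq_zero.mpr (fun h => hxk (pv_mem_takeWhile_eq h))
  calc (t.dropWhile (· == k)).count x
      = ((t.takeWhile (· == k)) ++ (t.dropWhile (· == k))).count x := by
        rw [List.count_append, htw]; omega
    _ = (k :: t).count x := by
        rw [List.takeWhile_append_dropWhile, List.count_cons]
        simp [Ne.symm hxk]

theorem pv_dropWhile_pairwise {k : String} {t : List String}
    (hs : (k :: t).Pairwise (· ≤ ·)) :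
    ((k :: (t.dropWhile (· == k)))).Pairwise (fun a b : String => a ≤ b) := by
  have hsub : (k :: t.dropWhile (· == k)).Sublist (k :: t) :=
    List.Sublist.cons₂ _ (List.dropWhile_sublist _)
  exact List.Pairwise.sublist hsub hs

theorem runsList_mem : ∀ (l : List String), l.Pairwise (· ≤ ·) →
    ∀ p : String × Int, p ∈ runsList l ↔ p.1 ∈ l ∧ p.2 = (l.count p.1 : Int) := by
  intro l
  induction l using runsList.induct with
  | case1 => intro _ p; simp [runsList]
  | case2 k t ih =>
    intro hs p
    have hpw' : (t.dropWhile (· == k)).Pairwise (fun a b : String => a ≤ b) :=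
      List.Pairwise.of_cons (pv_dropWhile_pairwise hs)
    rw [runsList]
    constructor
    · intro hp
      rcases List.mem_cons.mp hp with h | h
      · subst h
        refine ⟨List.mem_cons_self, ?_⟩
        simp [pv_count_head hs]
      · obtain ⟨hmem, hcnt⟩ := (ih hpw' p).mp h
        refine ⟨List.mem_cons_of_mem _ ((List.dropWhile_sublist _).subset hmem), ?_⟩
        rw [hcnt, pv_count_dropWhile hs hmem]
    · rintro ⟨hmem, hcnt⟩
      by_cases hpk : p.1 = k
      · refine List.mem_cons.mpr (Or.inl ?_)
        rw [Prod.ext_iff]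
        exact ⟨hpk, by rw [hcnt, hpk, pv_count_head hs]; push_cast; ring⟩
      · refine List.mem_cons.mpr (Or.inr ((ih hpw' p).mpr ⟨?_, ?_⟩))
        · rcases List.mem_cons.mp hmem with h | h
          · exact absurd h hpk
          · rcases (List.takeWhile_append_dropWhile (p := (· == k)) (l := t)) ▸ h with h'
            rcases List.mem_append.mp h' with h2 | h2
            · exact absurd (pv_mem_takeWhile_eq h2) hpk
            · exact h2
        · have hmemdw : p.1 ∈ t.dropWhile (· == k) := by
            rcases List.mem_cons.mp hmem with h | h
            · exact absurd h hpk
            · rcases (List.takeWhile_append_dropWhile (p := (· == k)) (l := t)) ▸ h with h'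
              rcases List.mem_append.mp h' with h2 | h2
              · exact absurd (pv_mem_takeWhile_eq h2) hpk
              · exact h2
          rw [hcnt, pv_count_dropWhile hs hmemdw]

theorem runsList_pairwise_lt : ∀ (l : List String), l.Pairwise (· ≤ ·) →
    (runsList l).Pairwise (fun a b : String × Int => a.1 < b.1) := by
  intro l
  induction l using runsList.induct with
  | case1 => intro _; simp [runsList]
  | case2 k t ih =>
    intro hs
    have hpw' : (t.dropWhile (· == k)).Pairwise (fun a b : String => a ≤ b) :=
      List.Pairwise.of_cons (pv_dropWhile_pairwise hs)
    rw [runsList]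
    refine List.Pairwise.cons (fun q hq => ?_) (ih hpw')
    have hq1 : q.1 ∈ t.dropWhile (· == k) := ((runsList_mem _ hpw' q).mp hq).1
    have hle : k ≤ q.1 :=
      List.rel_of_pairwise_cons hs ((List.dropWhile_sublist _).subset hq1)
    exact lt_of_le_of_ne hle (fun h => pv_mem_dropWhile_ne hs hq1 h.symm)

theorem runCount_items : ∀ (l : List String) (res : PySem.Dict String Int),
    l.Pairwise (· ≤ ·) → (∀ k ∈ l, res.contains k = false) →
    (runCount l res).items = res.items ++ runsList l := by
  intro l
  induction l using runsList.induct with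
  | case1 => intro res _ _; simp [runCount, runsList]
  | case2 k t ih =>
    intro res hs hres
    rw [runCount, runsList]
    have hfresh : res.contains k = false := hres k (List.mem_cons_self)
    have hres' : ∀ k' ∈ t.dropWhile (· == k),
        (res.insert k (1 + ((t.takeWhile (· == k)).length : Int))).contains k' = false := by
      intro k' hk'
      rw [PySem.Dict.contains_insert]
      have h1 : (k' == k) = false := by
        simpa using pv_mem_dropWhile_ne hs hk'
      have h2 : res.contains k' = false :=
        hres k' (List.mem_cons_of_mem _ ((List.dropWhile_sublist _).subset hk'))
      rw [h1, h2]; rfl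
    rw [ih _ (List.Pairwise.of_cons (pv_dropWhile_pairwise hs)) hres',
        PySem.Dict.items_insert_of_not_contains _ _ hfresh, List.append_assoc]
    rfl

theorem pv_foldA (ind : Int) : ∀ (bd : List (List String)) (d : PySem.Dict String Int),
    (∀ e ∈ bd, PySem.Raise.InRange e.length ind) →
    bd.foldl (distribStep ind) d
      = (bd.filterMap (fun e => PySem.List.pyGet? e ind)).foldl
          (fun d k => d.insert k (d.getD k 0 + 1)) d := by
  intro bd
  induction bd with
  | nil => intro d _; rfl
  | cons e bd ih =>
    intro d hpre
    obtain ⟨k, hk⟩ : ∃ k, PySem.List.pyGet? e ind = some k := by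
      cases h : PySem.List.pyGet? e ind with
      | none => exact absurd (hpre e List.mem_cons_self) ((PySem.List.pyGet?_eq_none_iff e ind).mp h)
      | some k => exact ⟨k, rfl⟩
    have hstep : distribStep ind d e = d.insert k (d.getD k 0 + 1) := by
      unfold distribStep
      rw [hk]
      by_cases hc : d.contains k
      · simp [hc]
      · have h0 : d.getD k 0 = 0 :=
          PySem.Dict.getD_of_not_contains d 0 (Bool.eq_false_iff.mpr hc)
        simp [hc, h0]
    simp only [List.foldl_cons, List.filterMap_cons, hk, hstep]
    exact ih _ (fun e' he' => hpre e' (List.mem_cons_of_mem _ he'))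

theorem pv_ofList_items {l : List (String × Int)} (h : (l.map Prod.fst).Nodup) :
    (PySem.Dict.ofList l).items = l := by
  have := PySem.Dict.items_foldl_insert_fresh l Prod.fst Prod.snd PySem.Dict.empty
    (fun a _ => PySem.Dict.contains_empty _) h
  simpa [PySem.Dict.ofList, PySem.Dict.update] using this

-- ===== VERDICT (by name: the statement is the Claim_ definition above) =====
theorem distrib_spec : Claim_equal_distrib := by
  intro bd ind _ hpre
  unfold Spec_distrib distrib distrib_alt
  dsimp only
  set ks := bd.filterMap (fun e => PySem.List.pyGet? e ind) with hks
  set sl := PySem.List.sorted ks (fun x => x) false with hsl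
  have hslpw : sl.Pairwise (fun a b : String => a ≤ b) := PySem.List.sorted_pairwise ks _
  -- B's value is runsList sl
  have hB : (runCount sl PySem.Dict.empty).items = runsList sl := by
    rw [runCount_items sl _ hslpw (fun k _ => PySem.Dict.contains_empty _)]
    rfl
  -- A's dict is the counter of ks
  have hA : bd.foldl (distribStep ind) PySem.Dict.empty = PySem.Dict.counter ks := by
    rw [pv_foldA ind bd _ hpre, PySem.Dict.foldl_insert_getD_add_one_eq_counter]
  have hRlt : (runsList sl).Pairwise (fun a b : String × Int => a.1 < b.1) :=
    runsList_pairwise_lt sl hslpw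
  have hRnd : (runsList sl).Nodup :=
    hRlt.imp (fun {a b} h => fun hab => absurd (hab ▸ h) (lt_irrefl _))
  have hCnd : ((PySem.Set.ofList ks).map (fun k => (k, (ks.count k : Int)))).Nodup :=
    (PySem.Set.nodup_ofList ks).map (fun a b hab => congrArg Prod.fst hab)
  have hperm : (runsList sl).Perm
      ((PySem.Set.ofList ks).map (fun k => (k, (ks.count k : Int)))) := by
    rw [List.perm_ext_iff_of_nodup hRnd hCnd]
    intro p
    rw [runsList_mem sl hslpw p, List.mem_map]
    constructor
    · rintro ⟨hmem, hcnt⟩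
      refine ⟨p.1, (PySem.Set.mem_ofList ks p.1).mpr
        ((PySem.List.mem_sorted ks _ false p.1).mp hmem), ?_⟩
      have hc : sl.count p.1 = ks.count p.1 := (PySem.List.sorted_perm ks _ false).count_eq p.1
      rw [← hc, ← hcnt]
    · rintro ⟨k, hk, hpk⟩
      have hc : sl.count k = ks.count k := (PySem.List.sorted_perm ks _ false).count_eq k
      refine ⟨?_, ?_⟩
      · rw [← hpk]
        exact (PySem.List.mem_sorted ks _ false k).mpr ((PySem.Set.mem_ofList ks k).mp hk)
      · rw [← hpk, ← hc]
  have hsorted : PySem.List.sorted ((PySem.Dict.counter ks).items) (fun x => x.1) false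
      = runsList sl := by
    rw [PySem.Dict.items_counter ks]
    exact PySem.List.sorted_eq_of_perm_of_pairwise_lt _ _ _ hperm hRlt
  rw [hA, hsorted, hB, pv_ofList_items]
  have : ((runsList sl).map Prod.fst).Pairwise (· < ·) := List.pairwise_map.mpr hRlt
  exact this.imp (fun {a b} h => ne_of_lt h)
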